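-- pv_equiv track=rewrite | github.com/aakash-bathini/SWE-Course-Project-Team8 | src/metrics/license_check.py | _select_license_text
-- ===== SOURCE A (Python) =====
-- from typing import Optional, Dict
--
-- _PREFERRED_LICENSE_NAMES = (
--     "LICENSE",
--     "LICENSE.TXT",
--     "LICENSE.MD",
--     "LICENCE",
--     "LICENCE.TXT",
--     "LICENCE.MD",
--     "COPYING",
--     "COPYRIGHT",
--     "UNLICENSE",
-- )
--
-- def _select_license_text(doc_texts: dict[str, str]) -> Optional[str]:
--     """Choose the best license text from a dict of path -> text."""
--     if not doc_texts:
--         return None  # nothing available in repo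
--     upper_map = {path.upper(): text for path, text in doc_texts.items()}  # case insensitive match
--     # exact filename match
--     for name in _PREFERRED_LICENSE_NAMES:
--         for path_upper, text in upper_map.items():
--             if path_upper.endswith(f"/{name}") or path_upper == name:
--                 return text
--     # loose basename match
--     for name in _PREFERRED_LICENSE_NAMES:
--         for path_upper, text in upper_map.items():
--             basename = path_upper.rsplit("/", 1)[-1]
--             if basename.startswith(name):
--                 return text
--     return None  # no good match
-- ===== SOURCE B (Python) =====
-- from typing import Optional
--
-- _PREFERRED_LICENSE_NAMES = (
--     "LICENSE",
--     "LICENSE.TXT",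
--     "LICENSE.MD",
--     "LICENCE",
--     "LICENCE.TXT",
--     "LICENCE.MD",
--     "COPYING",
--     "COPYRIGHT",
--     "UNLICENSE",
-- )
--
-- def _rank(path_upper: str):
--     """Priority of one (uppercased) path: (0, i) for an exact filename match with
--     the i-th preferred name, else (1, j) for a loose basename prefix match, else None."""
--     for i, name in enumerate(_PREFERRED_LICENSE_NAMES):
--         if path_upper.endswith("/" + name) or path_upper == name:
--             return (0, i)
--     basename = path_upper.rsplit("/", 1)[-1]
--     for j, name in enumerate(_PREFERRED_LICENSE_NAMES):
--         if basename.startswith(name):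
--             return (1, j)
--     return None
--
-- def _select_license_text(doc_texts: dict[str, str]) -> Optional[str]:
--     """Choose the best license text: single pass keeping the minimum-rank entry."""
--     upper_map = {path.upper(): text for path, text in doc_texts.items()}
--     best = None  # (rank, text); strict '<' keeps the earliest entry on equal rank
--     for path_upper, text in upper_map.items():
--         r = _rank(path_upper)
--         if r is not None and (best is None or r < best[0]):
--             best = (r, text)
--     return best[1] if best is not None else None
-- ===== Notes on version B (the rewrite author's own statement) =====
-- stated objective: simpler
-- what changed: A makes up to 18 full scans of the map (name-outer nested loops in two phases); B computes a per-path rank (phase, name-index) once and keeps the running minimum in a single pass over the map, ties broken by insertion order via strict '<'.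
import Mathlib
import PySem

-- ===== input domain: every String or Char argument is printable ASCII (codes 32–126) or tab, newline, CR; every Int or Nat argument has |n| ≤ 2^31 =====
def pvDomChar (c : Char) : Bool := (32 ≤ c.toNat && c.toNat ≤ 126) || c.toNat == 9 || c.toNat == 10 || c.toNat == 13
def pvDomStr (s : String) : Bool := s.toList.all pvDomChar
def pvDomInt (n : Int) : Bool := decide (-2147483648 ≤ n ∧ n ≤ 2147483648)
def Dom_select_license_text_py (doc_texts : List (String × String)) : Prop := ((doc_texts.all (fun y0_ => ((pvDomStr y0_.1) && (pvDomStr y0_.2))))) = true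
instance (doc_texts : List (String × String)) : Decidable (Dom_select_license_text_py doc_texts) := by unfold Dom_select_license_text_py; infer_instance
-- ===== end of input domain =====

-- B replaces A's up-to-18 name-outer scans of the map by a per-path rank (phase, name-index)
-- and a single running-minimum pass; objective: simpler (return value only; neither mutates).


-- ===== PORT A =====
def pvNames : List String :=
  ["LICENSE", "LICENSE.TXT", "LICENSE.MD", "LICENCE", "LICENCE.TXT", "LICENCE.MD",
   "COPYING", "COPYRIGHT", "UNLICENSE"]

-- path_upper.endswith("/" + name) or path_upper == name
def pvExact (p n : String) : Bool := PySem.Str.endswith p ("/" ++ n) || p == n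

-- p.rsplit("/", 1)[-1] : the suffix after the last '/' (hand port, exact: rsplit with
-- maxsplit 1 cuts at the last '/', and [-1] takes what follows; whole string if no '/')
def pvBase (p : String) : String := String.ofList ((p.toList.reverse.takeWhile (· ≠ '/')).reverse)

-- basename.startswith(name)
def pvLoose (p n : String) : Bool := PySem.Str.startswith (pvBase p) n

-- {path.upper(): text for path, text in doc_texts.items()}, as its item list
def pvUpperMap (doc_texts : List (String × String)) : List (String × String) :=
  (doc_texts.foldl (fun d pt => d.insert (PySem.Str.upper pt.1) pt.2)
    (PySem.Dict.empty : PySem.Dict String String)).items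

def select_license_text_py (doc_texts : List (String × String)) : Option String :=
  if doc_texts.isEmpty then none
  else
    let um := pvUpperMap doc_texts
    -- exact filename match: for name in names: for path,text in um: if exact: return text
    match pvNames.findSome? (fun n => (um.find? (fun pt => pvExact pt.1 n)).map (·.2)) with
    | some t => some t
    | none =>
      -- loose basename match
      pvNames.findSome? (fun n => (um.find? (fun pt => pvLoose pt.1 n)).map (·.2))

-- ===== PORT B =====
-- _rank: first exact name index as (0, i), else first loose index as (1, j), else none
def pvRank (p : String) : Option (Nat × Nat) :=
  match pvNames.findIdx? (fun n => pvExact p n) with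
  | some i => some (0, i)
  | none =>
    match pvNames.findIdx? (fun n => pvLoose p n) with
    | some j => some (1, j)
    | none => none

-- r < best[0] on pairs (lexicographic, Python tuple '<')
def pvRlt (a b : Nat × Nat) : Bool := a.1 < b.1 || (a.1 == b.1 && a.2 < b.2)

-- one step of B's loop: keep best if no rank or not strictly smaller
def pvStep (best : Option ((Nat × Nat) × String)) (pt : String × String) :
    Option ((Nat × Nat) × String) :=
  match pvRank pt.1 with
  | none => best
  | some r =>
    match best with
    | none => some (r, pt.2)
    | some (br, _) => if pvRlt r br then some (r, pt.2) else best

def select_license_text_py_alt (doc_texts : List (String × String)) : Option String :=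
  (((pvUpperMap doc_texts).foldl pvStep none).map (·.2))

-- ===== PRECONDITION & SPEC =====
def Spec_select_license_text_py (doc_texts : List (String × String)) (out : Option String) : Prop := out = select_license_text_py_alt doc_texts
instance (doc_texts : List (String × String)) (out : Option String) : Decidable (Spec_select_license_text_py doc_texts out) := by unfold Spec_select_license_text_py; infer_instance

-- ===== CLAIM (what is proved, stated in full; the proofs are below) =====
def Claim_equal_select_license_text_py : Prop := ∀ (doc_texts : List (String × String)), Dom_select_license_text_py doc_texts → Spec_select_license_text_py doc_texts (select_license_text_py doc_texts)

-- ===== LEMMAS AND PROOFS =====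

-- min on Option Nat with none = ∞
def omin : Option Nat → Option Nat → Option Nat
  | none, b => b
  | some a, none => some a
  | some a, some b => some (min a b)

-- minimum over xs of the first index in ns matched by P x.1
def minIdxP (P : String → String → Bool) (ns : List String)
    (xs : List (String × String)) : Option Nat :=
  xs.foldr (fun x acc => omin (ns.findIdx? (P x.1)) acc) none

-- best' : recursive reference for B's fold (head wins ties)
def best' : List (String × String) → Option ((Nat × Nat) × String)
  | [] => none
  | x :: xs =>
    match pvRank x.1, best' xs with
    | none, b => b
    | some r, none => some (r, x.2)
    | some r, some (br, bt) => if pvRlt br r then some (br, bt) else some (r, x.2)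

def merge (acc b : Option ((Nat × Nat) × String)) : Option ((Nat × Nat) × String) :=
  match b with
  | none => acc
  | some (r, t) =>
    match acc with
    | none => some (r, t)
    | some (ar, _) => if pvRlt r ar then some (r, t) else acc

theorem find?_congr_mem {α : Type} {p q : α → Bool} :
    ∀ (l : List α), (∀ x ∈ l, p x = q x) → l.find? p = l.find? q := by
  intro l
  induction l with
  | nil => intro _; rfl
  | cons a t ih =>
    intro h
    simp only [List.find?_cons, h a (by simp)]
    cases q a <;> simp [ih (fun x hx => h x (by simp [hx]))]

theorem omin_none_left (b : Option Nat) : omin none b = b := rfl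
theorem omin_none_right (a : Option Nat) : omin a none = a := by cases a <;> rfl

theorem omin_eq_none {a b : Option Nat} (h : omin a b = none) : a = none ∧ b = none := by
  cases a <;> cases b <;> simp [omin] at h ⊢

theorem omin_zero_left (b : Option Nat) : omin (some 0) b = some 0 := by
  cases b <;> simp [omin]
theorem omin_zero_right (a : Option Nat) : omin a (some 0) = some 0 := by
  cases a <;> simp [omin]

theorem omin_map_succ (a b : Option Nat) :
    omin (a.map (· + 1)) (b.map (· + 1)) = (omin a b).map (· + 1) := by
  cases a <;> cases b <;> simp [omin, Nat.succ_min_succ]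

theorem minIdxP_nil (P : String → String → Bool) (ns : List String) :
    minIdxP P ns [] = none := rfl

theorem minIdxP_cons (P : String → String → Bool) (ns : List String)
    (x : String × String) (xs : List (String × String)) :
    minIdxP P ns (x :: xs) = omin (ns.findIdx? (P x.1)) (minIdxP P ns xs) := rfl

theorem minIdxP_nil_ns (P : String → String → Bool) :
    ∀ (xs : List (String × String)), minIdxP P [] xs = none := by
  intro xs
  induction xs with
  | nil => rfl
  | cons x t ih => rw [minIdxP_cons, ih]; simp [omin]

theorem idx_cons_zero (p : String → Bool) (n : String) (t : List String) :
    (((n :: t).findIdx? p) == some 0) = p n := by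
  cases h : p n
  · simp only [List.findIdx?_cons, h, if_false, Bool.false_eq_true]
    cases t.findIdx? p <;> simp
  · simp [List.findIdx?_cons, h]

theorem minIdxP_zero (P : String → String → Bool) (n : String) (t : List String) :
    ∀ (xs : List (String × String)), (∃ x ∈ xs, P x.1 n = true) →
      minIdxP P (n :: t) xs = some 0 := by
  intro xs
  induction xs with
  | nil => rintro ⟨x, hx, _⟩; simp at hx
  | cons y ys ih =>
    rintro ⟨x, hx, hp⟩
    rw [minIdxP_cons]
    rcases List.mem_cons.mp hx with h | h
    · subst h
      rw [List.findIdx?_cons, if_pos hp]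
      exact omin_zero_left _
    · rw [ih ⟨x, h, hp⟩]
      exact omin_zero_right _

theorem minIdxP_shift (P : String → String → Bool) (n : String) (t : List String) :
    ∀ (xs : List (String × String)), (∀ x ∈ xs, P x.1 n = false) →
      minIdxP P (n :: t) xs = (minIdxP P t xs).map (· + 1) := by
  intro xs
  induction xs with
  | nil => intro _; rfl
  | cons y ys ih =>
    intro h
    rw [minIdxP_cons, minIdxP_cons, List.findIdx?_cons, if_neg (by simp [h y (by simp)]),
        ih (fun x hx => h x (by simp [hx]))]
    exact omin_map_succ _ _

theorem idx_succ_eq (p : String → Bool) (n : String) (t : List String) (i : Nat)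
    (h : p n = false) :
    (((n :: t).findIdx? p) == some (i + 1)) = ((t.findIdx? p) == some i) := by
  simp only [List.findIdx?_cons, h, if_false, Bool.false_eq_true]
  cases t.findIdx? p <;> simp

theorem phase_eq (P : String → String → Bool) :
    ∀ (ns : List String) (xs : List (String × String)),
      ns.findSome? (fun n => (xs.find? (fun x => P x.1 n)).map (·.2))
      = match minIdxP P ns xs with
        | none => none
        | some i => (xs.find? (fun x => (ns.findIdx? (P x.1)) == some i)).map (·.2) := by
  intro ns
  induction ns with
  | nil => intro xs; rw [minIdxP_nil_ns]; rfl
  | cons n t ih =>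
    intro xs
    rw [List.findSome?_cons]
    by_cases h : ∃ x ∈ xs, P x.1 n = true
    · have hs : (xs.find? (fun x => P x.1 n)).isSome := by
        rw [List.find?_isSome]; exact h
      obtain ⟨y, hy⟩ := Option.isSome_iff_exists.mp hs
      rw [minIdxP_zero P n t xs h, hy]
      have hpred : (fun x : String × String => ((n :: t).findIdx? (P x.1)) == some 0)
          = (fun x => P x.1 n) := by
        funext x; exact idx_cons_zero (P x.1) n t
      simp only [hpred, hy, Option.map_some]
    · have hall : ∀ x ∈ xs, P x.1 n = false := by
        intro x hx
        cases hp : P x.1 n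
        · rfl
        · exact absurd ⟨x, hx, hp⟩ h
      rw [List.find?_eq_none.mpr (fun x hx => by simp [hall x hx])]
      simp only [Option.map_none]
      rw [ih xs, minIdxP_shift P n t xs hall]
      cases hm : minIdxP P t xs with
      | none => rfl
      | some i =>
        simp only [Option.map_some]
        rw [find?_congr_mem xs
          (fun x hx => idx_succ_eq (P x.1) n t i (hall x hx))]

-- abbreviations for the two per-item indices
def pvE (x : String × String) : Option Nat := pvNames.findIdx? (fun n => pvExact x.1 n)
def pvL (x : String × String) : Option Nat := pvNames.findIdx? (fun n => pvLoose x.1 n)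

theorem pvRank_eq (x : String × String) :
    pvRank x.1 = match pvE x with
      | some i => some (0, i)
      | none => match pvL x with
        | some j => some (1, j)
        | none => none := rfl

theorem pvRlt_iff (a b : Nat × Nat) :
    pvRlt a b = true ↔ (a.1 < b.1 ∨ (a.1 = b.1 ∧ a.2 < b.2)) := by
  simp [pvRlt]
  try omega

theorem best'_spec : ∀ (xs : List (String × String)),
    (minIdxP pvExact pvNames xs = none → minIdxP pvLoose pvNames xs = none →
      best' xs = none)
    ∧ (∀ i, minIdxP pvExact pvNames xs = some i →
        ∃ y, xs.find? (fun x => pvE x == some i) = some y ∧ best' xs = some ((0, i), y.2))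
    ∧ (minIdxP pvExact pvNames xs = none → ∀ j, minIdxP pvLoose pvNames xs = some j →
        ∃ y, xs.find? (fun x => pvL x == some j) = some y ∧ best' xs = some ((1, j), y.2)) := by
  intro xs
  induction xs with
  | nil =>
    refine ⟨fun _ _ => rfl, fun i hi => ?_, fun _ j hj => ?_⟩
    · rw [minIdxP_nil] at hi; cases hi
    · rw [minIdxP_nil] at hj; cases hj
  | cons x xs ih =>
    obtain ⟨ih1, ih2, ih3⟩ := ih
    have hEc : minIdxP pvExact pvNames (x :: xs)
        = omin (pvE x) (minIdxP pvExact pvNames xs) := rfl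
    have hLc : minIdxP pvLoose pvNames (x :: xs)
        = omin (pvL x) (minIdxP pvLoose pvNames xs) := rfl
    refine ⟨?_, ?_, ?_⟩
    · -- both none
      intro hE hL
      rw [hEc] at hE; rw [hLc] at hL
      obtain ⟨hEx, hExs⟩ := omin_eq_none hE
      obtain ⟨hLx, hLxs⟩ := omin_eq_none hL
      show (match pvRank x.1, best' xs with
        | none, b => b
        | some r, none => some (r, x.2)
        | some r, some (br, bt) => if pvRlt br r then some (br, bt) else some (r, x.2)) = none
      rw [pvRank_eq, hEx, hLx, ih1 hExs hLxs]
    · -- exact phase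
      intro i hi
      rw [hEc] at hi
      cases hEx : pvE x with
      | none =>
        rw [hEx, omin_none_left] at hi
        obtain ⟨y, hy, hb⟩ := ih2 i hi
        refine ⟨y, ?_, ?_⟩
        · rw [List.find?_cons_of_neg (by simp [hEx])]; exact hy
        · show (match pvRank x.1, best' xs with
            | none, b => b
            | some r, none => some (r, x.2)
            | some r, some (br, bt) => if pvRlt br r then some (br, bt) else some (r, x.2))
            = some ((0, i), y.2)
          rw [pvRank_eq, hEx, hb]
          cases hLx : pvL x with
          | none => rfl
          | some j =>
            show (if pvRlt (0, i) (1, j) then some ((0, i), y.2) else some ((1, j), x.2))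
              = some ((0, i), y.2)
            rw [if_pos (by rw [pvRlt_iff]; omega)]
      | some e =>
        rw [hEx] at hi
        cases hExs : minIdxP pvExact pvNames xs with
        | none =>
          rw [hExs, omin_none_right] at hi
          obtain rfl : e = i := Option.some.inj hi
          refine ⟨x, ?_, ?_⟩
          · rw [List.find?_cons_of_pos (by simp [hEx])]
          · show (match pvRank x.1, best' xs with
              | none, b => b
              | some r, none => some (r, x.2)
              | some r, some (br, bt) => if pvRlt br r then some (br, bt) else some (r, x.2))
              = some ((0, e), x.2)
            rw [pvRank_eq, hEx]
            cases hLxs : minIdxP pvLoose pvNames xs with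
            | none => rw [ih1 hExs hLxs]
            | some j =>
              obtain ⟨y, _, hb⟩ := ih3 hExs j hLxs
              rw [hb]
              show (if pvRlt (1, j) (0, e) then some ((1, j), y.2) else some ((0, e), x.2))
                = some ((0, e), x.2)
              rw [if_neg (by rw [pvRlt_iff]; omega)]
        | some m =>
          rw [hExs] at hi
          simp only [omin] at hi
          injection hi with hi
          obtain ⟨y, hy, hb⟩ := ih2 m hExs
          by_cases hem : e ≤ m
          · have : i = e := by omega
            subst this
            refine ⟨x, ?_, ?_⟩
            · rw [List.find?_cons_of_pos (by simp [hEx])]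
            · show (match pvRank x.1, best' xs with
                | none, b => b
                | some r, none => some (r, x.2)
                | some r, some (br, bt) => if pvRlt br r then some (br, bt) else some (r, x.2))
                = some ((0, i), x.2)
              rw [pvRank_eq, hEx, hb]
              show (if pvRlt (0, m) (0, i) then some ((0, m), y.2) else some ((0, i), x.2))
                = some ((0, i), x.2)
              rw [if_neg (by rw [pvRlt_iff]; omega)]
          · have hmi : i = m := by omega
            subst hmi
            refine ⟨y, ?_, ?_⟩
            · rw [List.find?_cons_of_neg (by simp [hEx]; omega)]
              exact hy
            · show (match pvRank x.1, best' xs with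
                | none, b => b
                | some r, none => some (r, x.2)
                | some r, some (br, bt) => if pvRlt br r then some (br, bt) else some (r, x.2))
                = some ((0, i), y.2)
              rw [pvRank_eq, hEx, hb]
              show (if pvRlt (0, i) (0, e) then some ((0, i), y.2) else some ((0, e), x.2))
                = some ((0, i), y.2)
              rw [if_pos (by rw [pvRlt_iff]; simp; omega)]
    · -- loose phase
      intro hE j hj
      rw [hEc] at hE; rw [hLc] at hj
      obtain ⟨hEx, hExs⟩ := omin_eq_none hE
      cases hLx : pvL x with
      | none =>
        rw [hLx, omin_none_left] at hj
        obtain ⟨y, hy, hb⟩ := ih3 hExs j hj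
        refine ⟨y, ?_, ?_⟩
        · rw [List.find?_cons_of_neg (by simp [hLx])]; exact hy
        · show (match pvRank x.1, best' xs with
            | none, b => b
            | some r, none => some (r, x.2)
            | some r, some (br, bt) => if pvRlt br r then some (br, bt) else some (r, x.2))
            = some ((1, j), y.2)
          rw [pvRank_eq, hEx, hLx, hb]
      | some l =>
        rw [hLx] at hj
        cases hLxs : minIdxP pvLoose pvNames xs with
        | none =>
          rw [hLxs, omin_none_right] at hj
          obtain rfl : l = j := Option.some.inj hj
          refine ⟨x, ?_, ?_⟩
          · rw [List.find?_cons_of_pos (by simp [hLx])]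
          · show (match pvRank x.1, best' xs with
              | none, b => b
              | some r, none => some (r, x.2)
              | some r, some (br, bt) => if pvRlt br r then some (br, bt) else some (r, x.2))
              = some ((1, l), x.2)
            rw [pvRank_eq, hEx, hLx, ih1 hExs hLxs]
        | some m =>
          rw [hLxs] at hj
          simp only [omin] at hj
          injection hj with hj
          obtain ⟨y, hy, hb⟩ := ih3 hExs m hLxs
          by_cases hlm : l ≤ m
          · have : j = l := by omega
            subst this
            refine ⟨x, ?_, ?_⟩
            · rw [List.find?_cons_of_pos (by simp [hLx])]
            · show (match pvRank x.1, best' xs with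
                | none, b => b
                | some r, none => some (r, x.2)
                | some r, some (br, bt) => if pvRlt br r then some (br, bt) else some (r, x.2))
                = some ((1, j), x.2)
              rw [pvRank_eq, hEx, hLx, hb]
              show (if pvRlt (1, m) (1, j) then some ((1, m), y.2) else some ((1, j), x.2))
                = some ((1, j), x.2)
              rw [if_neg (by rw [pvRlt_iff]; omega)]
          · have : j = m := by omega
            subst this
            refine ⟨y, ?_, ?_⟩
            · rw [List.find?_cons_of_neg (by simp [hLx]; omega)]
              exact hy
            · show (match pvRank x.1, best' xs with
                | none, b => b
                | some r, none => some (r, x.2)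
                | some r, some (br, bt) => if pvRlt br r then some (br, bt) else some (r, x.2))
                = some ((1, j), y.2)
              rw [pvRank_eq, hEx, hLx, hb]
              show (if pvRlt (1, j) (1, l) then some ((1, j), y.2) else some ((1, l), x.2))
                = some ((1, j), y.2)
              rw [if_pos (by rw [pvRlt_iff]; omega)]

theorem merge_none_left (b : Option ((Nat × Nat) × String)) : merge none b = b := by
  cases b with
  | none => rfl
  | some p => obtain ⟨r, t⟩ := p; rfl

theorem foldl_eq_merge : ∀ (xs : List (String × String)) (acc : Option ((Nat × Nat) × String)),
    xs.foldl pvStep acc = merge acc (best' xs) := by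
  intro xs
  induction xs with
  | nil => intro acc; rfl
  | cons x xs ih =>
    intro acc
    rw [List.foldl_cons, ih]
    have hbc : best' (x :: xs) = match pvRank x.1, best' xs with
        | none, b => b
        | some r, none => some (r, x.2)
        | some r, some (br, bt) => if pvRlt br r then some (br, bt) else some (r, x.2) := rfl
    have hsc : pvStep acc x = match pvRank x.1 with
        | none => acc
        | some r => match acc with
          | none => some (r, x.2)
          | some (br, _) => if pvRlt r br then some (r, x.2) else acc := rfl
    rw [hbc, hsc]
    cases hr : pvRank x.1 with
    | none => rfl
    | some r =>
      cases hb : best' xs with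
      | none =>
        cases acc with
        | none => rfl
        | some p =>
          obtain ⟨ar, at_⟩ := p
          by_cases h : pvRlt r ar = true <;> simp [merge, h]
      | some p =>
        obtain ⟨br, bt⟩ := p
        cases acc with
        | none =>
          by_cases h : pvRlt br r = true <;> simp [merge, h]
        | some q =>
          obtain ⟨ar, at_⟩ := q
          by_cases h1 : pvRlt r ar = true <;> by_cases h2 : pvRlt br r = true
          · have h3 : pvRlt br ar = true := by
              rw [pvRlt_iff] at h1 h2 ⊢; omega
            simp [merge, h1, h2, h3]
          · simp [merge, h1, h2]
          · simp [merge, h1, h2]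
          · have h3 : ¬ pvRlt br ar = true := by
              rw [pvRlt_iff] at h1 h2 ⊢; omega
            simp [merge, h1, h2, h3]

theorem core_eq (xs : List (String × String)) :
    (match pvNames.findSome? (fun n => (xs.find? (fun pt => pvExact pt.1 n)).map (·.2)) with
      | some t => some t
      | none => pvNames.findSome? (fun n => (xs.find? (fun pt => pvLoose pt.1 n)).map (·.2)))
    = ((xs.foldl pvStep none).map (·.2)) := by
  rw [foldl_eq_merge, merge_none_left]
  rw [phase_eq pvExact pvNames xs, phase_eq pvLoose pvNames xs]
  obtain ⟨h1, h2, h3⟩ := best'_spec xs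
  cases hE : minIdxP pvExact pvNames xs with
  | some i =>
    obtain ⟨y, hy, hb⟩ := h2 i hE
    simp only [hb]
    rw [show (fun x : String × String => (pvNames.findIdx? (pvExact x.1)) == some i)
        = (fun x => pvE x == some i) from rfl, hy]
    rfl
  | none =>
    cases hL : minIdxP pvLoose pvNames xs with
    | none => rw [h1 hE hL]; rfl
    | some j =>
      obtain ⟨y, hy, hb⟩ := h3 hE j hL
      simp only [hb]
      rw [show (fun x : String × String => (pvNames.findIdx? (pvLoose x.1)) == some j)
          = (fun x => pvL x == some j) from rfl, hy]
      rfl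

-- ===== VERDICT =====
theorem select_license_text_py_spec : Claim_equal_select_license_text_py := by
  intro doc_texts _
  show select_license_text_py doc_texts = select_license_text_py_alt doc_texts
  unfold select_license_text_py select_license_text_py_alt
  by_cases h : doc_texts.isEmpty
  · rw [if_pos h]
    have : doc_texts = [] := List.isEmpty_iff.mp h
    subst this
    rfl
  · rw [if_neg h]
    exact core_eq (pvUpperMap doc_texts)
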